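-- pv_equiv track=rewrite | github.com/Vincero1023/joe_coding | projects/Keyword_Forge/app/analyzer/scorer.py | _is_meaningless_keyword
-- ===== SOURCE A (Python) =====
-- def _is_meaningless_keyword(tokens: list[str]) -> bool:
--     if not tokens:
--         return True
--
--     lowered_tokens = [token.lower() for token in tokens]
--     if len(set(lowered_tokens)) == 1 and len(lowered_tokens) > 1:
--         return True
--
--     for index in range(1, len(lowered_tokens)):
--         if lowered_tokens[index] == lowered_tokens[index - 1]:
--             return True
--
--     counts: dict[str, int] = {}
--     for token in lowered_tokens:
--         counts[token] = counts.get(token, 0) + 1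
--         if counts[token] > 2:
--             return True
--
--     return False
-- ===== SOURCE B (Python) =====
-- def _is_meaningless_keyword(tokens: list[str]) -> bool:
--     # Single fused pass: prev-token adjacency check and frequency count in one loop.
--     if not tokens:
--         return True
--     prev = None
--     counts: dict[str, int] = {}
--     for token in tokens:
--         low = token.lower()
--         if low == prev:
--             return True
--         count = counts.get(low, 0) + 1
--         if count > 2:
--             return True
--         counts[low] = count
--         prev = low
--     return False
-- ===== Notes on version B (the rewrite author's own statement) =====
-- stated objective: faster
-- what changed: Replaces A's three separate passes (all-same set check, index-based adjacency scan, dict counting loop) with one fused pass that maintains the previous lowered token and a running count dict; the redundant all-same branch is dropped as it is subsumed by the adjacency check.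
import Mathlib
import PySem

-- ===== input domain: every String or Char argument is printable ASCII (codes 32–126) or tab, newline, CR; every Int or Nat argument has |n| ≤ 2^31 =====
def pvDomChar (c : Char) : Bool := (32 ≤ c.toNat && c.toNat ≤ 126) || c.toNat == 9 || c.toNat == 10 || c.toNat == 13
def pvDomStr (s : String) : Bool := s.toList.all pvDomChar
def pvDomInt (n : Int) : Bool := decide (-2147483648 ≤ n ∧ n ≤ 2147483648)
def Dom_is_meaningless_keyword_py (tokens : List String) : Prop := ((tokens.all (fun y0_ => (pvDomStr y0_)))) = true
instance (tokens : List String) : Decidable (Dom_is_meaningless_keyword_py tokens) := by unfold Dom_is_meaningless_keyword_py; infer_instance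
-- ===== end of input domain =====

-- B fuses A's three passes into one loop; equivalence of the return value is proved below.

-- ===== PORT A =====
-- A's final counting loop ('for token in lowered_tokens: counts[token] += 1; if > 2: return True')
def pvCountLoopA (lowered : List String) (counts : PySem.Dict String Int) : Bool :=
  match lowered with
  | [] => false
  | t :: rest =>
    let counts := counts.insert t (counts.getD t 0 + 1)
    if counts.getD t 0 > 2 then true else pvCountLoopA rest counts

def is_meaningless_keyword_py (tokens : List String) : Bool :=
  if tokens = [] then true
  else
    let lowered := tokens.map PySem.Str.lower
    if (PySem.Set.ofList lowered).length = 1 ∧ 1 < lowered.length then true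
    else if (PySem.List.pyRange 1 (lowered.length : Int) 1).any
        (fun i => decide (PySem.List.pyGetD lowered i "" = PySem.List.pyGetD lowered (i - 1) "")) then
      true
    else pvCountLoopA lowered PySem.Dict.empty

-- ===== PORT B =====
-- B's single fused loop: prev = previous lowered token, counts = running frequency dict
def pvLoopB (tokens : List String) (prev : Option String) (counts : PySem.Dict String Int) : Bool :=
  match tokens with
  | [] => false
  | token :: rest =>
    let low := PySem.Str.lower token
    if some low = prev then true
    else
      let count := counts.getD low 0 + 1
      if count > 2 then true
      else pvLoopB rest (some low) (counts.insert low count)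

def is_meaningless_keyword_py_alt (tokens : List String) : Bool :=
  if tokens = [] then true
  else pvLoopB tokens none PySem.Dict.empty

-- ===== PRECONDITION & SPEC =====
def Spec_is_meaningless_keyword_py (tokens : List String) (out : Bool) : Prop := out = is_meaningless_keyword_py_alt tokens
instance (tokens : List String) (out : Bool) : Decidable (Spec_is_meaningless_keyword_py tokens out) := by unfold Spec_is_meaningless_keyword_py; infer_instance

-- ===== CLAIM (what is proved, stated in full; the proofs are below) =====
def Claim_equal_is_meaningless_keyword_py : Prop := ∀ (tokens : List String), Dom_is_meaningless_keyword_py tokens → Spec_is_meaningless_keyword_py tokens (is_meaningless_keyword_py tokens)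

-- ===== LEMMAS AND PROOFS =====

-- adjacency predicate threaded like B's prev state
def pvAdjP (prev : Option String) (l : List String) : Bool :=
  match l with
  | [] => false
  | t :: rest => (some t = prev : Bool) || pvAdjP (some t) rest

-- adjacency predicate over consecutive pairs
def pvPairAdj (l : List String) : Bool :=
  match l with
  | [] => false
  | [_] => false
  | a :: b :: rest => (b = a : Bool) || pvPairAdj (b :: rest)

theorem pvLoopB_eq (l : List String) : ∀ (prev : Option String) (counts : PySem.Dict String Int),
    pvLoopB l prev counts = (pvAdjP prev (l.map PySem.Str.lower) || pvCountLoopA (l.map PySem.Str.lower) counts) := by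
  induction l with
  | nil => intro prev counts; simp [pvLoopB, pvAdjP, pvCountLoopA]
  | cons t rest ih =>
    intro prev counts
    simp only [pvLoopB, pvAdjP, pvCountLoopA, List.map_cons]
    by_cases h : some (PySem.Str.lower t) = prev
    · simp [h]
    · simp only [h, if_false, decide_false, Bool.false_or]
      rw [PySem.Dict.getD_insert_self]
      by_cases h2 : counts.getD (PySem.Str.lower t) 0 + 1 > 2
      · simp [h2]
      · simp only [h2, if_false]
        rw [ih]

theorem pvAdjP_some (l : List String) : ∀ a, pvAdjP (some a) l = pvPairAdj (a :: l) := by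
  induction l with
  | nil => intro a; simp [pvAdjP, pvPairAdj]
  | cons b rest ih =>
    intro a
    simp only [pvAdjP, pvPairAdj, ih b, Option.some.injEq]

theorem pvAdjP_none (l : List String) : pvAdjP none l = pvPairAdj l := by
  cases l with
  | nil => rfl
  | cons a rest => simp [pvAdjP, pvAdjP_some]

-- the index-based adjacency scan on natural-number indices equals the structural pair scan
theorem pvScanNat_eq (l : List String) :
    (List.range (l.length - 1)).any (fun k => decide (l.getD (k + 1) "" = l.getD k "")) = pvPairAdj l := by
  induction l with
  | nil => simp [pvPairAdj]
  | cons a rest ih =>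
    cases rest with
    | nil => simp [pvPairAdj]
    | cons b rest' =>
      have hlen : (a :: b :: rest').length - 1 = (b :: rest').length - 1 + 1 := by
        simp
      rw [hlen, List.range_succ_eq_map]
      simp only [List.any_cons, List.any_map, pvPairAdj]
      have h0 : decide ((a :: b :: rest').getD (0 + 1) "" = (a :: b :: rest').getD 0 "") = decide (b = a) := by
        simp [List.getD]
      have h1 : ((List.range ((b :: rest').length - 1)).any
          ((fun k => decide ((a :: b :: rest').getD (k + 1) "" = (a :: b :: rest').getD k "")) ∘ Nat.succ)) = pvPairAdj (b :: rest') := by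
        rw [← ih]
        refine PySem.List.any_congr_mem fun k _ => ?_
        simp [List.getD, Function.comp]
      rw [h0, h1]

-- A's pyRange-based scan equals the structural pair scan
theorem pvScan_eq (l : List String) :
    ((PySem.List.pyRange 1 (l.length : Int) 1).any
      (fun i => decide (PySem.List.pyGetD l i "" = PySem.List.pyGetD l (i - 1) ""))) = pvPairAdj l := by
  rw [PySem.List.pyRange_one, List.any_map, ← pvScanNat_eq]
  have harg : ((l.length : Int) - 1).toNat = l.length - 1 := by omega
  rw [harg]
  refine PySem.List.any_congr_mem fun k _ => ?_
  have h1 : (1 : Int) + (k : Int) = ((k + 1 : Nat) : Int) := by push_cast; ring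
  have h2 : ((k + 1 : Nat) : Int) - 1 = ((k : Nat) : Int) := by push_cast; ring
  simp only [Function.comp, h1, h2, PySem.List.pyGetD_natCast]

-- the all-same set branch is subsumed by the adjacency scan
theorem pvSetBranch_adj (l : List String) (h1 : (PySem.Set.ofList l).length = 1)
    (h2 : 1 < l.length) : pvPairAdj l = true := by
  match l, h2 with
  | a :: b :: rest, _ =>
    obtain ⟨e, he⟩ : ∃ e, PySem.Set.ofList (a :: b :: rest) = [e] := by
      match hs : PySem.Set.ofList (a :: b :: rest), h1 with
      | [e], _ => exact ⟨e, rfl⟩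
    have ha : a = e := by
      have : a ∈ PySem.Set.ofList (a :: b :: rest) := by
        rw [PySem.Set.mem_ofList]; simp
      rw [he] at this; simpa using this
    have hb : b = e := by
      have : b ∈ PySem.Set.ofList (a :: b :: rest) := by
        rw [PySem.Set.mem_ofList]; simp
      rw [he] at this; simpa using this
    simp [pvPairAdj, ha, hb]

-- ===== VERDICT (by name: the statement is the Claim_ definition above) =====
theorem is_meaningless_keyword_py_spec : Claim_equal_is_meaningless_keyword_py := by
  intro tokens _
  unfold Spec_is_meaningless_keyword_py is_meaningless_keyword_py is_meaningless_keyword_py_alt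
  by_cases hnil : tokens = []
  · simp [hnil]
  · simp only [hnil, if_false]
    rw [pvLoopB_eq, pvAdjP_none]
    set l := tokens.map PySem.Str.lower with hl
    by_cases hadj : pvPairAdj l = true
    · rw [pvScan_eq l] at *
      by_cases hset : (PySem.Set.ofList l).length = 1 ∧ 1 < l.length
      · simp [hset, hadj]
      · simp [hset, hadj]
    · have hadj' : pvPairAdj l = false := by simpa using hadj
      have hset : ¬ ((PySem.Set.ofList l).length = 1 ∧ 1 < l.length) := by
        rintro ⟨h1, h2⟩
        rw [pvSetBranch_adj l h1 h2] at hadj'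
        exact Bool.true_eq_false.mp hadj'
      rw [pvScan_eq l] at *
      simp [hset, hadj']
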